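-- pv_equiv track=rewrite | github.com/ILikeEggsToo/HuntingTourneyBot | HuntingTourneyBot.py | resolve_stage_name
-- ===== SOURCE A (Python) =====
-- from typing import Any, Dict, List, Optional, Tuple
--
-- STAGES: Dict[str, List[str]] = {
--     "Wild Canyon": ["WC", "wild", "canyon"],
--     "Pumpkin Hill": ["PH", "pumpkin", "hill"],
--     "Death Chamber": ["DC", "death", "chamber"],
--     "Aquatic Mine": ["AM", "aquatic", "mine"],
--     "Meteor Herd": ["MH", "meteor", "herd"],
--     "Dry Lagoon": ["DL", "dry", "lagoon"],
--     "Egg Quarters": ["EQ", "egg", "quarters"],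
--     "Security Hall": ["SH", "security", "hall"],
--     "Mad Space": ["MS", "mad", "space"],
-- }
--
-- def resolve_stage_name(stage_input: str) -> Optional[str]:
--     """Convert abbreviated or partial stage name to full stage name"""
--     stage_input = stage_input.lower()
--
--     # First check for exact matches (case insensitive)
--     for stage_name, abbreviations in STAGES.items():
--         if stage_input == stage_name.lower():
--             return stage_name
--
--     # Then check for abbreviations and partial matches
--     for stage_name, abbreviations in STAGES.items():
--         if stage_input in [abbr.lower() for abbr in abbreviations]:
--             return stage_name
--
--     # No match found
--     return None
-- ===== SOURCE B (Python) =====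
-- from typing import Dict, List, Optional
--
-- STAGES: Dict[str, List[str]] = {
--     "Wild Canyon": ["WC", "wild", "canyon"],
--     "Pumpkin Hill": ["PH", "pumpkin", "hill"],
--     "Death Chamber": ["DC", "death", "chamber"],
--     "Aquatic Mine": ["AM", "aquatic", "mine"],
--     "Meteor Herd": ["MH", "meteor", "herd"],
--     "Dry Lagoon": ["DL", "dry", "lagoon"],
--     "Egg Quarters": ["EQ", "egg", "quarters"],
--     "Security Hall": ["SH", "security", "hall"],
--     "Mad Space": ["MS", "mad", "space"],
-- }
--
-- # Flat index precomputed once: lowered full names first, then lowered abbreviations.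
-- _STAGE_INDEX: Dict[str, str] = {}
-- for _name in STAGES:
--     _STAGE_INDEX[_name.lower()] = _name
-- for _name, _abbrs in STAGES.items():
--     for _a in _abbrs:
--         _STAGE_INDEX[_a.lower()] = _name
--
-- def resolve_stage_name(stage_input: str) -> Optional[str]:
--     """Convert abbreviated or partial stage name to full stage name"""
--     return _STAGE_INDEX.get(stage_input.lower())
-- ===== Notes on version B (the rewrite author's own statement) =====
-- stated objective: simpler
-- what changed: Replaced the two sequential scans over STAGES (exact-name pass, then abbreviation pass with a per-stage lowered list built on every call) by one flat dict from every lowered key to its full stage name, precomputed once at module load; the function body is a single dict lookup.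
import Mathlib
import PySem

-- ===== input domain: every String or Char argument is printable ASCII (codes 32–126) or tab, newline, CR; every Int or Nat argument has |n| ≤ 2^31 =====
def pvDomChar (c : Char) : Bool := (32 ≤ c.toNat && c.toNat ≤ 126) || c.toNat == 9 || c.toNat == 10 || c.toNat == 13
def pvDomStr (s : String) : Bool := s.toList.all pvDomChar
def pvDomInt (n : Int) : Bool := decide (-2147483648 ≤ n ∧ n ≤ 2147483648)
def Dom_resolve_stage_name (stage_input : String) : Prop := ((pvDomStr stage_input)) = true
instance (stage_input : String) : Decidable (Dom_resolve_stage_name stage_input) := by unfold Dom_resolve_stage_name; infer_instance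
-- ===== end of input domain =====

-- B replaces A's two sequential scans by a single flat precomputed index (lowered key -> full name) and one lookup: simpler.

-- ===== PORT A =====
def STAGES : List (String × List String) := [
  ("Wild Canyon", ["WC", "wild", "canyon"]),
  ("Pumpkin Hill", ["PH", "pumpkin", "hill"]),
  ("Death Chamber", ["DC", "death", "chamber"]),
  ("Aquatic Mine", ["AM", "aquatic", "mine"]),
  ("Meteor Herd", ["MH", "meteor", "herd"]),
  ("Dry Lagoon", ["DL", "dry", "lagoon"]),
  ("Egg Quarters", ["EQ", "egg", "quarters"]),
  ("Security Hall", ["SH", "security", "hall"]),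
  ("Mad Space", ["MS", "mad", "space"])]

-- first loop of A: exact match against lowered full names
def aLoop1 (si : String) : List (String × List String) → Option String
  | [] => none
  | (name, _) :: rest => if si = PySem.Str.lower name then some name else aLoop1 si rest

-- second loop of A: membership in the lowered abbreviation list
def aLoop2 (si : String) : List (String × List String) → Option String
  | [] => none
  | (name, abbrs) :: rest =>
      if si ∈ abbrs.map PySem.Str.lower then some name else aLoop2 si rest

def resolve_stage_name (stage_input : String) : Option String :=
  let si := PySem.Str.lower stage_input
  match aLoop1 si STAGES with
  | some n => some n
  | none => aLoop2 si STAGES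

-- ===== PORT B =====
-- the two module-level build loops of Source B
def STAGE_INDEX : PySem.Dict String String :=
  let d := STAGES.foldl (fun d p => d.insert (PySem.Str.lower p.1) p.1) PySem.Dict.empty
  STAGES.foldl (fun d p => p.2.foldl (fun d a => d.insert (PySem.Str.lower a) p.1) d) d

def resolve_stage_name_alt (stage_input : String) : Option String :=
  STAGE_INDEX.get? (PySem.Str.lower stage_input)

-- ===== PRECONDITION & SPEC =====
def Spec_resolve_stage_name (stage_input : String) (out : Option String) : Prop := out = resolve_stage_name_alt stage_input
instance (stage_input : String) (out : Option String) : Decidable (Spec_resolve_stage_name stage_input out) := by unfold Spec_resolve_stage_name; infer_instance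

-- ===== CLAIM (what is proved, stated in full; the proofs are below) =====
def Claim_equal_resolve_stage_name : Prop := ∀ (stage_input : String), Dom_resolve_stage_name stage_input → Spec_resolve_stage_name stage_input (resolve_stage_name stage_input)

-- ===== LEMMAS AND PROOFS =====
set_option maxRecDepth 8192
set_option maxHeartbeats 1000000

-- all 36 lowered keys (9 full names + 27 abbreviations)
def KEYS : List String := ["wild canyon", "pumpkin hill", "death chamber", "aquatic mine",
  "meteor herd", "dry lagoon", "egg quarters", "security hall", "mad space",
  "wc", "wild", "canyon", "ph", "pumpkin", "hill", "dc", "death", "chamber",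
  "am", "aquatic", "mine", "mh", "meteor", "herd", "dl", "dry", "lagoon",
  "eq", "egg", "quarters", "sh", "security", "hall", "ms", "mad", "space"]

lemma aLoop1_ne (si : String) (l : List (String × List String))
    (h : ∀ p ∈ l, si ≠ PySem.Str.lower p.1) : aLoop1 si l = none := by
  induction l with
  | nil => rfl
  | cons p rest ih =>
    obtain ⟨n, ab⟩ := p
    unfold aLoop1
    rw [if_neg (h (n, ab) (by simp))]
    exact ih (fun q hq => h q (by simp [hq]))

lemma aLoop2_ne (si : String) (l : List (String × List String))
    (h : ∀ p ∈ l, ∀ a ∈ p.2, si ≠ PySem.Str.lower a) : aLoop2 si l = none := by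
  induction l with
  | nil => rfl
  | cons p rest ih =>
    obtain ⟨n, ab⟩ := p
    unfold aLoop2
    rw [if_neg (by
      intro hmem
      rw [List.mem_map] at hmem
      obtain ⟨a, ha, he⟩ := hmem
      exact h (n, ab) (by simp) a ha he.symm)]
    exact ih (fun q hq => h q (by simp [hq]))

lemma key_lemma (t : String) :
    (match aLoop1 t STAGES with
     | some n => some n
     | none => aLoop2 t STAGES) = STAGE_INDEX.get? t := by
  by_cases hm : t ∈ KEYS
  · fin_cases hm <;> decide
  · have h1 : aLoop1 t STAGES = none := by
      apply aLoop1_ne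
      intro p hp
      fin_cases hp <;> (intro he; exact hm (by rw [he]; decide))
    have h2 : aLoop2 t STAGES = none := by
      apply aLoop2_ne
      intro p hp
      fin_cases hp <;> (intro a ha; fin_cases ha <;> (intro he; exact hm (by rw [he]; decide)))
    have hk : STAGE_INDEX.keys = KEYS := by decide
    have hB : STAGE_INDEX.get? t = none := by
      rw [PySem.Dict.get?_eq_none_iff_not_mem_keys, hk]
      exact hm
    rw [h1, h2, hB]

-- ===== VERDICT (by name: the statement is the Claim_ definition above) =====
theorem resolve_stage_name_spec : Claim_equal_resolve_stage_name := by
  intro s _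
  unfold Spec_resolve_stage_name resolve_stage_name resolve_stage_name_alt
  exact key_lemma (PySem.Str.lower s)
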